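-- pv_equiv track=rewrite | github.com/edlansiaux/sma_qlearning_scheduling | visualization.py | build_gantt_data
-- ===== SOURCE A (Python) =====
-- from typing import Dict, List, Tuple, Optional, Any
--
-- def build_gantt_data(task_times: Dict, skills: List[int]) -> Tuple[Dict, int]:
--     """
--     Formate les données pour le diagramme de Gantt.
--
--     Args:
--         task_times: Dict (i, j, s) -> (start, end, duration)
--         skills: Liste des compétences
--
--     Returns:
--         (données par skill, horizon temporel)
--     """
--     by_skill = {s: [] for s in skills}
--     horizon = 0
--
--     for (i, j, s), (start, finish, p) in task_times.items():
--         by_skill[s].append({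
--             "start": start, "end": finish, "dur": p,
--             "patient": i, "op": j
--         })
--         horizon = max(horizon, finish)
--
--     for s in skills:
--         by_skill[s].sort(key=lambda x: (x["start"], x["patient"], x["op"]))
--
--     return by_skill, horizon
-- ===== SOURCE B (Python) =====
-- def build_gantt_data(task_times, skills):
--     """One global stable sort of all items, then a single partition pass into
--     pre-initialized buckets; horizon as a separate reduction."""
--     by_skill = {s: [] for s in skills}
--     order = sorted(task_times.items(),
--                    key=lambda kv: (kv[1][0], kv[0][0], kv[0][1]))
--     for (i, j, s), (start, finish, p) in order:
--         by_skill[s].append({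
--             "start": start, "end": finish, "dur": p,
--             "patient": i, "op": j
--         })
--     horizon = max([0] + [finish for (_, finish, _) in task_times.values()])
--     return by_skill, horizon
-- ===== Notes on version B (the rewrite author's own statement) =====
-- stated objective: alternative
-- what changed: Replaces A's per-skill bucket sorts with one global stable sort of all items by (start, patient, op) followed by a single partition pass into pre-initialized buckets, and computes the horizon as a separate max reduction.
import Mathlib
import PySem

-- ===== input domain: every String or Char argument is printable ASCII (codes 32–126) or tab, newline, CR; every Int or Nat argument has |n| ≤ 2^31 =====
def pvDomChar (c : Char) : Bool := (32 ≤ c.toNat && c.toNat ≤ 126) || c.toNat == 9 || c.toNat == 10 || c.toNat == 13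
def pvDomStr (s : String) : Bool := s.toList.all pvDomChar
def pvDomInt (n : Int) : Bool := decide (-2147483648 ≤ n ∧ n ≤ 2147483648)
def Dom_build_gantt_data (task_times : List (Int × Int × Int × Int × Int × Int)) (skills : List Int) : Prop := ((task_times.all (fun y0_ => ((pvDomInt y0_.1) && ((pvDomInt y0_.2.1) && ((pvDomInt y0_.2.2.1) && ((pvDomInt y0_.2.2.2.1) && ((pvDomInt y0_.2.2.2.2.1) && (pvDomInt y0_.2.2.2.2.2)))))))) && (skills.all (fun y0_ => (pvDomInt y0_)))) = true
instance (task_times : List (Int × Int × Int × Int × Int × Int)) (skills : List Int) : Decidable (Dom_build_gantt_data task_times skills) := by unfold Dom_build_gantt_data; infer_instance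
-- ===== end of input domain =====

-- B replaces A's per-skill bucket sorts by one global stable sort plus a single partition pass
-- (objective: alternative decomposition, same cost). Return values only; no argument is mutated.

-- ===== PORT A =====
-- the dict literal appended for one task entry e = (i, j, s, start, finish, p)
def pvRec (e : Int × Int × Int × Int × Int × Int) : List (String × Int) :=
  [("start", e.2.2.2.1), ("end", e.2.2.2.2.1), ("dur", e.2.2.2.2.2),
   ("patient", e.1), ("op", e.2.1)]

-- x[name] on such a record (hand port of the dict lookup; exact: every record carries the key)
def pvFieldD (r : List (String × Int)) (name : String) : Int :=
  (((r.find? (fun q => q.1 == name)).map (·.2)).getD 0)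

-- sort key (x["start"], x["patient"], x["op"]) encoded into one Int; on Dom every component has
-- |v| ≤ 2^31 < 2^32, so Int order on the encoding is exactly Python's lexicographic tuple order
def pvKeyRec (r : List (String × Int)) : Int :=
  (pvFieldD r "start" * 8589934592 + pvFieldD r "patient") * 8589934592 + pvFieldD r "op"

def build_gantt_data (task_times : List (Int × Int × Int × Int × Int × Int)) (skills : List Int) : (List (Int × List (List (String × Int)))) × Int :=
  -- by_skill = {s: [] for s in skills}
  let by0 : PySem.Dict Int (List (List (String × Int))) :=
    skills.foldl (fun d s => d.insert s []) PySem.Dict.empty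
  -- single loop appending records and updating horizon (by_skill[s].append(...): on Pre_ the key
  -- s is always present, so Dict.modify with default [] is exact; missing keys = KeyError = outside Pre_)
  let st := task_times.foldl
    (fun (acc : PySem.Dict Int (List (List (String × Int))) × Int) e =>
      (acc.1.modify e.2.2.1 [] (· ++ [pvRec e]), max acc.2 e.2.2.2.2.1))
    (by0, (0 : Int))
  -- for s in skills: by_skill[s].sort(key=...)
  let d2 := skills.foldl
    (fun d s => d.modify s [] (fun l => PySem.List.sorted l pvKeyRec false)) st.1
  (d2.items, st.2)

-- ===== PORT B =====
-- sort key (kv[1][0], kv[0][0], kv[0][1]) on the raw tuple, same lex-exact encoding as above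
def pvKeyTup (e : Int × Int × Int × Int × Int × Int) : Int :=
  (e.2.2.2.1 * 8589934592 + e.1) * 8589934592 + e.2.1

def build_gantt_data_alt (task_times : List (Int × Int × Int × Int × Int × Int)) (skills : List Int) : (List (Int × List (List (String × Int)))) × Int :=
  -- by_skill = {s: [] for s in skills}
  let by0 : PySem.Dict Int (List (List (String × Int))) :=
    skills.foldl (fun d s => d.insert s []) PySem.Dict.empty
  -- order = sorted(task_times.items(), key=...)
  let order := PySem.List.sorted task_times pvKeyTup false
  -- single partition pass (by_skill[s].append(...): exact on Pre_ as in port A)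
  let d := order.foldl (fun d e => d.modify e.2.2.1 [] (· ++ [pvRec e])) by0
  -- horizon = max([0] + [finish ...])   (the list is nonempty, so .getD 0 is never the fallback)
  let horizon := (PySem.List.max? ((0 : Int) :: task_times.map (fun e => e.2.2.2.2.1)) (fun x => x)).getD 0
  (d.items, horizon)

-- ===== PRECONDITION & SPEC =====
-- Pre_ excludes only inputs where A raises KeyError: some task's skill s is not in skills.
def Pre_build_gantt_data (task_times : List (Int × Int × Int × Int × Int × Int)) (skills : List Int) : Prop :=
  ∀ e ∈ task_times, e.2.2.1 ∈ skills
instance (task_times : List (Int × Int × Int × Int × Int × Int)) (skills : List Int) : Decidable (Pre_build_gantt_data task_times skills) := by unfold Pre_build_gantt_data; infer_instance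

def pvWitness_build_gantt_data : (List (Int × Int × Int × Int × Int × Int)) × List Int :=
  ([(1, 1, 2, 0, 3, 3), (1, 2, 5, 3, 4, 1)], [2, 5])

def Spec_build_gantt_data (task_times : List (Int × Int × Int × Int × Int × Int)) (skills : List Int) (out : (List (Int × List (List (String × Int)))) × Int) : Prop := out = build_gantt_data_alt task_times skills
instance (task_times : List (Int × Int × Int × Int × Int × Int)) (skills : List Int) (out : (List (Int × List (List (String × Int)))) × Int) : Decidable (Spec_build_gantt_data task_times skills out) := by unfold Spec_build_gantt_data; infer_instance

-- ===== CLAIM (what is proved, stated in full; the proofs are below) =====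
def Claim_equal_build_gantt_data : Prop := ∀ (task_times : List (Int × Int × Int × Int × Int × Int)) (skills : List Int), Dom_build_gantt_data task_times skills → Pre_build_gantt_data task_times skills → Spec_build_gantt_data task_times skills (build_gantt_data task_times skills)

-- ===== LEMMAS AND PROOFS =====

theorem pvKeyRec_pvRec (e : Int × Int × Int × Int × Int × Int) :
    pvKeyRec (pvRec e) = pvKeyTup e := by
  simp [pvKeyRec, pvKeyTup, pvRec, pvFieldD, List.find?]

theorem pv_insertBy_head {α : Type} (key : α → Int) (x : α) (M : List α)
    (h : ∀ z ∈ M, key x < key z) :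
    PySem.List.insertBy (fun a b => decide (key a < key b)) x M = x :: M := by
  cases M with
  | nil => rfl
  | cons y ys =>
      have : key x < key y := h y (by simp)
      simp [PySem.List.insertBy, this]

theorem pv_insertBy_filter {α : Type} (key : α → Int) (p : α → Bool) (x : α) (L : List α)
    (h : L.Pairwise (fun a b => key a ≤ key b)) :
    (PySem.List.insertBy (fun a b => decide (key a < key b)) x L).filter p =
      if p x then PySem.List.insertBy (fun a b => decide (key a < key b)) x (L.filter p)
      else L.filter p := by
  induction L with
  | nil =>
      by_cases hp : p x = true <;> simp [PySem.List.insertBy, List.filter, hp]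
  | cons y L ih =>
      rw [List.pairwise_cons] at h
      obtain ⟨hy, hL⟩ := h
      by_cases hxy : key x < key y
      · have hhead : ∀ z ∈ (y :: L).filter p, key x < key z := by
          intro z hz
          have hz' := List.mem_of_mem_filter hz
          rcases List.mem_cons.mp hz' with rfl | hz''
          · exact hxy
          · exact lt_of_lt_of_le hxy (hy z hz'')
        by_cases hp : p x = true
        · rw [pv_insertBy_head key x _ hhead]
          simp [PySem.List.insertBy, hxy, List.filter, hp]
        · simp [PySem.List.insertBy, hxy, List.filter, hp]
      · by_cases hpy : p y = true <;> by_cases hp : p x = true <;>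
          simp [PySem.List.insertBy, hxy, List.filter, hpy, hp, ih hL]
  
theorem pv_sorted_append_singleton {α : Type} (key : α → Int) (l : List α) (x : α) :
    PySem.List.sorted (l ++ [x]) key false =
      PySem.List.insertBy (fun a b => decide (key a < key b)) x (PySem.List.sorted l key false) := by
  rw [PySem.List.sorted_eq_foldl_insertBy, PySem.List.sorted_eq_foldl_insertBy, List.foldl_append]
  rfl

-- a stable sort commutes with filter
theorem pv_filter_sorted {α : Type} (key : α → Int) (p : α → Bool) (xs : List α) :
    (PySem.List.sorted xs key false).filter p = PySem.List.sorted (xs.filter p) key false := by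
  induction xs using List.reverseRecOn with
  | nil => rfl
  | append_singleton l x ih =>
      rw [pv_sorted_append_singleton, List.filter_append,
        pv_insertBy_filter key p x _ (PySem.List.sorted_pairwise l key),
        ih]
      by_cases hp : p x = true
      · simp [hp, pv_sorted_append_singleton]
      · simp [hp]

theorem pv_map_insertBy {α β : Type} (keyT : α → Int) (keyR : β → Int) (f : α → β)
    (hk : ∀ e, keyR (f e) = keyT e) (x : α) (M : List α) :
    (PySem.List.insertBy (fun a b => decide (keyT a < keyT b)) x M).map f =
      PySem.List.insertBy (fun a b => decide (keyR a < keyR b)) (f x) (M.map f) := by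
  induction M with
  | nil => rfl
  | cons y M ih =>
      by_cases hxy : keyT x < keyT y <;>
        simp [PySem.List.insertBy, hxy, hk, ih]

-- sorting the mapped records by the record key = mapping the tuple-key sort
theorem pv_sorted_map {α β : Type} (keyT : α → Int) (keyR : β → Int) (f : α → β)
    (hk : ∀ e, keyR (f e) = keyT e) (xs : List α) :
    PySem.List.sorted (xs.map f) keyR false = (PySem.List.sorted xs keyT false).map f := by
  induction xs using List.reverseRecOn with
  | nil => rfl
  | append_singleton l x ih =>
      rw [List.map_append, List.map_singleton, pv_sorted_append_singleton,
        pv_sorted_append_singleton, ih, pv_map_insertBy keyT keyR f hk]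

theorem pv_foldl_insert_nil_getD {ν : Type} (sk : List Int) (d : PySem.Dict Int (List ν)) (k : Int)
    (h : d.getD k [] = []) :
    (sk.foldl (fun d s => d.insert s []) d).getD k [] = [] := by
  induction sk generalizing d with
  | nil => exact h
  | cons s sk ih =>
      refine ih _ ?_
      rw [PySem.Dict.getD_insert]
      split <;> simp [h]

theorem pv_foldl_modify_sort_getD {ν : Type} (f : ν → ν) (hf : ∀ v, f (f v) = f v) (d0 : ν)
    (sk : List Int) (d : PySem.Dict Int ν) (k : Int) :
    (sk.foldl (fun d s => d.modify s d0 f) d).getD k d0 =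
      if k ∈ sk then f (d.getD k d0) else d.getD k d0 := by
  induction sk generalizing d with
  | nil => simp
  | cons s sk ih =>
      rw [List.foldl_cons, ih, PySem.Dict.getD_modify]
      by_cases hks : k = s <;> by_cases hk : k ∈ sk <;>
        simp [hks, hk, hf]

theorem pv_update_noop {s : PySem.Set Int} {xs : List Int} (h : ∀ x ∈ xs, x ∈ s) :
    PySem.Set.update s xs = s := by
  rw [PySem.Set.update_eq_append_filter]
  have : (PySem.Set.ofList xs).filter (fun y => !s.contains y) = [] := by
    rw [List.filter_eq_nil_iff]
    intro y hy
    have hmem : y ∈ xs := (PySem.Set.mem_ofList xs y).mp hy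
    simpa using h y hmem
  rw [this, List.append_nil]

-- value of the append-grouping fold at key k (both ports share this loop shape)
theorem pv_group_getD (l : List (Int × Int × Int × Int × Int × Int))
    (by0 : PySem.Dict Int (List (List (String × Int)))) (k : Int)
    (h0 : by0.getD k [] = []) :
    (l.foldl (fun d e => d.modify e.2.2.1 [] (· ++ [pvRec e])) by0).getD k [] =
      (l.filter (fun e => e.2.2.1 == k)).map pvRec := by
  have hmap : l.foldl (fun d e => d.modify e.2.2.1 [] (· ++ [pvRec e])) by0 =
      (l.map (fun e => (e.2.2.1, pvRec e))).foldl
        (fun d p => d.modify p.1 [] (· ++ [p.2])) by0 := by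
    rw [List.foldl_map]
  rw [hmap, PySem.Dict.getD_foldl_modify_append, h0, List.nil_append, List.filter_map]
  simp [Function.comp_def, List.map_map]

-- ===== VERDICT (by name: the statement is the Claim_ definition above) =====
theorem build_gantt_data_spec : Claim_equal_build_gantt_data := by
  intro tt skills _hdom hpre
  unfold Spec_build_gantt_data
  show
    ((skills.foldl (fun d s => d.modify s [] (fun l => PySem.List.sorted l pvKeyRec false))
        (tt.foldl (fun (acc : PySem.Dict Int (List (List (String × Int))) × Int) e =>
          (acc.1.modify e.2.2.1 [] (· ++ [pvRec e]), max acc.2 e.2.2.2.2.1))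
          (skills.foldl (fun d s => d.insert s []) PySem.Dict.empty, (0 : Int))).1).items,
     (tt.foldl (fun (acc : PySem.Dict Int (List (List (String × Int))) × Int) e =>
          (acc.1.modify e.2.2.1 [] (· ++ [pvRec e]), max acc.2 e.2.2.2.2.1))
          (skills.foldl (fun d s => d.insert s []) PySem.Dict.empty, (0 : Int))).2) =
    (((PySem.List.sorted tt pvKeyTup false).foldl
        (fun d e => d.modify e.2.2.1 [] (· ++ [pvRec e]))
        (skills.foldl (fun d s => d.insert s []) PySem.Dict.empty)).items,
     (PySem.List.max? ((0 : Int) :: tt.map (fun e => e.2.2.2.2.1)) (fun x => x)).getD 0)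
  rw [PySem.List.foldl_prod_mk
    (f := fun d e => PySem.Dict.modify d e.2.2.1 [] (· ++ [pvRec e]))
    (g := fun (h : Int) e => max h e.2.2.2.2.1)]
  set by0 : PySem.Dict Int (List (List (String × Int))) :=
    skills.foldl (fun d s => d.insert s []) PySem.Dict.empty with hby0
  have h0 : ∀ k, by0.getD k [] = [] := fun k =>
    pv_foldl_insert_nil_getD skills PySem.Dict.empty k (by simp)
  -- the two grouping dicts
  set dA := tt.foldl (fun d e => d.modify e.2.2.1 [] (· ++ [pvRec e])) by0 with hdA
  set dB := (PySem.List.sorted tt pvKeyTup false).foldl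
      (fun d e => d.modify e.2.2.1 [] (· ++ [pvRec e])) by0 with hdB
  set d2 := skills.foldl
      (fun d s => d.modify s [] (fun l => PySem.List.sorted l pvKeyRec false)) dA with hd2
  have hkeys0 : by0.keys = PySem.Set.ofList skills := by
    rw [hby0, PySem.Dict.keys_foldl_insert (f := fun _ _ => []), PySem.Dict.keys_empty]
    rfl
  have hmemskills : ∀ (l : List (Int × Int × Int × Int × Int × Int)),
      (∀ e ∈ l, e.2.2.1 ∈ skills) →
      (l.foldl (fun d e => d.modify e.2.2.1 [] (· ++ [pvRec e])) by0).keys =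
        PySem.Set.ofList skills := by
    intro l hl
    rw [PySem.Dict.keys_foldl_modify_key (key := fun e => e.2.2.1)
      (f := fun _ e v => v ++ [pvRec e]), hkeys0]
    refine pv_update_noop ?_
    intro x hx
    obtain ⟨e, he, rfl⟩ := List.mem_map.mp hx
    exact (PySem.Set.mem_ofList skills _).mpr (hl e he)
  have hkeysA : dA.keys = PySem.Set.ofList skills := hmemskills tt hpre
  have hkeysB : dB.keys = PySem.Set.ofList skills := by
    refine hmemskills _ ?_
    intro e he
    exact hpre e ((PySem.List.mem_sorted tt pvKeyTup false e).mp he)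
  have hkeys2 : d2.keys = PySem.Set.ofList skills := by
    rw [hd2, PySem.Dict.keys_foldl_modify_key (key := fun s => s)
      (f := fun _ _ l => PySem.List.sorted l pvKeyRec false), hkeysA, List.map_id']
    exact pv_update_noop (fun x hx => (PySem.Set.mem_ofList skills x).mpr hx)
  -- per-key values agree
  have hval : ∀ k, d2.getD k [] = dB.getD k [] := by
    intro k
    have hA : dA.getD k [] = (tt.filter (fun e => e.2.2.1 == k)).map pvRec :=
      pv_group_getD tt by0 k (h0 k)
    have hB : dB.getD k [] =
        ((PySem.List.sorted tt pvKeyTup false).filter (fun e => e.2.2.1 == k)).map pvRec :=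
      pv_group_getD _ by0 k (h0 k)
    rw [hd2, pv_foldl_modify_sort_getD _ (fun l => PySem.List.sorted_sorted l pvKeyRec) [] skills dA k, hA, hB]
    by_cases hk : k ∈ skills
    · rw [if_pos hk, pv_sorted_map pvKeyTup pvKeyRec pvRec pvKeyRec_pvRec,
        pv_filter_sorted]
    · rw [if_neg hk]
      have h1 : ∀ (l : List (Int × Int × Int × Int × Int × Int)),
          (∀ e ∈ l, e.2.2.1 ∈ skills) → l.filter (fun e => e.2.2.1 == k) = [] := by
        intro l hl
        rw [List.filter_eq_nil_iff]
        intro e he hek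
        exact hk ((beq_iff_eq.mp hek) ▸ hl e he)
      rw [h1 tt hpre, h1 _ (fun e he => hpre e ((PySem.List.mem_sorted tt pvKeyTup false e).mp he))]
  -- items equal
  have hnodup : (PySem.Set.ofList skills).Nodup := PySem.Set.nodup_ofList skills
  have hitems : d2.items = dB.items := by
    rw [PySem.Dict.items_eq_map_keys d2 (by rw [hkeys2]; exact hnodup) [],
      PySem.Dict.items_eq_map_keys dB (by rw [hkeysB]; exact hnodup) [],
      hkeys2, hkeysB]
    exact List.map_congr_left (fun k _ => by rw [hval k])
  -- horizon equal
  have hhor : tt.foldl (fun (h : Int) e => max h e.2.2.2.2.1) 0 =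
      (PySem.List.max? ((0 : Int) :: tt.map (fun e => e.2.2.2.2.1)) (fun x => x)).getD 0 := by
    rw [PySem.List.max?_id_cons, Option.getD_some, List.foldl_map]
  exact Prod.ext (by simpa using hitems) (by simpa using hhor)
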